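-- pv_equiv track=rewrite | github.com/kschweiger/Mimir3 | mimir/frontend/terminal/display.py | splitOptionLine
-- ===== SOURCE A (Python) =====
-- def splitOptionLine(elements, maxlen):
--     """
--     Splits the passed elements so the joined string does not exceed maxlen
--
--     Args:
--         elements (list) : List of strings that should be joined with
--         maxlen (int) : Maximum allowed length elements can be joined to
--
--     Returns:
--         nElements (int) : Index where the input elements have to be split so the joined fit into maxLen
--         remainingElements (list) : Remaining elements that exceed the joined maxLen
--     """
--     nElements = len(elements)
--     joinedString = " | ".join(elements)
--     while len(joinedString) > maxlen:
--         nElements -= 1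
--         joinedString = " | ".join(elements[:nElements])
--
--     remainingElements = elements[nElements:]
--     return nElements, remainingElements
-- ===== SOURCE B (Python) =====
-- def splitOptionLine(elements, maxlen):
--     # One forward pass over running joined length (O(total chars)) instead of
--     # re-joining the shrinking prefix each time (A is quadratic).
--     n = 0
--     total = 0
--     for el in elements:
--         add = len(el) + (3 if n else 0)
--         if total + add > maxlen:
--             break
--         total += add
--         n += 1
--     return n, elements[n:]
-- ===== Notes on version B (the rewrite author's own statement) =====
-- stated objective: faster
-- what changed: A re-joins the shrinking prefix from scratch on every iteration of a backward while loop; B makes one forward pass keeping a running joined length and stops at the first element that would overflow maxlen.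
import Mathlib
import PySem

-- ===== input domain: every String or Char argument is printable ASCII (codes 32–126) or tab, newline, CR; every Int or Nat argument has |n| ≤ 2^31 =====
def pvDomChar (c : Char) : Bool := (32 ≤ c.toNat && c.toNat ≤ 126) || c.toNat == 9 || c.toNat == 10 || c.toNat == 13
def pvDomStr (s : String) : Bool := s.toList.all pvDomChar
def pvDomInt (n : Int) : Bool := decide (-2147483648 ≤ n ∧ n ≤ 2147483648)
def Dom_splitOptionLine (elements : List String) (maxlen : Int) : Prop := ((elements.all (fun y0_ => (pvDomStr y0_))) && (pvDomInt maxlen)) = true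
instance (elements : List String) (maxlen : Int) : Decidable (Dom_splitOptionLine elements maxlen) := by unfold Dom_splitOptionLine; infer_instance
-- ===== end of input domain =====

-- B replaces A's quadratic re-join of the shrinking prefix by one forward pass over a
-- running joined length (objective: faster, asymptotic).

-- ===== PORT A =====
-- the while loop; fuel = elements.length + 1 suffices whenever the Python loop terminates
-- (under Pre_ the counter stays ≥ 0 and strictly decreases); on fuel exhaustion we return
-- the current counter (only reachable outside Pre_)
def pvLoopA (elements : List String) (maxlen : Int) : Nat → Int → String → Int
  | 0, n, _ => n
  | f+1, n, joined =>
    if maxlen < PySem.Str.len joined then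
      pvLoopA elements maxlen f (n - 1)
        (PySem.Str.join " | " (PySem.List.slice elements none (some (n - 1))))
    else n

def splitOptionLine (elements : List String) (maxlen : Int) : Int × List String :=
  let nElements : Int := elements.length
  let joined := PySem.Str.join " | " elements
  let n := pvLoopA elements maxlen (elements.length + 1) nElements joined
  (n, PySem.List.slice elements (some n) none)

-- ===== PORT B =====
def pvLoopB (maxlen : Int) : List String → Int → Nat → Nat
  | [], _, n => n
  | e :: rest, total, n =>
    let add := PySem.Str.len e + (if n = 0 then 0 else 3)
    if maxlen < total + add then n
    else pvLoopB maxlen rest (total + add) (n + 1)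

def splitOptionLine_alt (elements : List String) (maxlen : Int) : Int × List String :=
  let n := pvLoopB maxlen elements 0 0
  ((n : Int), PySem.List.slice elements (some (n : Int)) none)

-- ===== PRECONDITION & SPEC =====
-- Pre_ excludes maxlen < 0, on which A's while loop never terminates ("".join length 0 is
-- still > maxlen, the counter decreases forever): A returns on no such input.
def Pre_splitOptionLine (elements : List String) (maxlen : Int) : Prop := 0 ≤ maxlen
instance (elements : List String) (maxlen : Int) : Decidable (Pre_splitOptionLine elements maxlen) := by unfold Pre_splitOptionLine; infer_instance
def pvWitness_splitOptionLine : List String × Int := (["ab", "c"], 4)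

def Spec_splitOptionLine (elements : List String) (maxlen : Int) (out : Int × List String) : Prop := out = splitOptionLine_alt elements maxlen
instance (elements : List String) (maxlen : Int) (out : Int × List String) : Decidable (Spec_splitOptionLine elements maxlen out) := by unfold Spec_splitOptionLine; infer_instance

-- ===== CLAIM (what is proved, stated in full; the proofs are below) =====
def Claim_equal_splitOptionLine : Prop := ∀ (elements : List String) (maxlen : Int), Dom_splitOptionLine elements maxlen → Pre_splitOptionLine elements maxlen → Spec_splitOptionLine elements maxlen (splitOptionLine elements maxlen)

-- ===== LEMMAS AND PROOFS =====

-- length of " | ".join es, as a structural recursion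
def pvL : List String → Int
  | [] => 0
  | [e] => PySem.Str.len e
  | e :: e' :: rest => PySem.Str.len e + 3 + pvL (e' :: rest)

-- joined length of the first k elements
def pvJ (es : List String) (k : Nat) : Int := pvL (es.take k)

-- the index A and B both compute: the largest j ≤ k with pvJ es j ≤ maxlen
def pvBest (es : List String) (maxlen : Int) : Nat → Nat
  | 0 => 0
  | k+1 => if pvJ es (k+1) ≤ maxlen then k+1 else pvBest es maxlen k


lemma pvL_join : ∀ es : List String, PySem.Str.len (PySem.Str.join " | " es) = pvL es
  | [] => by decide
  | [e] => by simp [PySem.Str.join, PySem.Str.len, PySem.Chars.join_singleton, pvL]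
  | e :: e' :: rest => by
      have ih := pvL_join (e' :: rest)
      simp [PySem.Str.join, PySem.Str.len, PySem.Chars.join_cons_cons, pvL] at *
      omega

lemma pvStrLen_nonneg (e : String) : 0 ≤ PySem.Str.len e := by
  simp [PySem.Str.len_eq]

lemma pvL_nonneg : ∀ es : List String, 0 ≤ pvL es
  | [] => le_refl 0
  | [e] => pvStrLen_nonneg e
  | e :: e' :: rest => by
      have ih := pvL_nonneg (e' :: rest)
      have := pvStrLen_nonneg e
      simp [pvL] at *
      omega

lemma pvL_append_singleton : ∀ (xs : List String) (x : String),
    pvL (xs ++ [x]) = pvL xs + (if xs = [] then 0 else 3) + PySem.Str.len x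
  | [], x => by simp [pvL]
  | [e], x => by simp [pvL]
  | e :: e' :: rest, x => by
      have ih := pvL_append_singleton (e' :: rest) x
      simp [pvL] at *
      omega

lemma pvJ_succ (es : List String) (k : Nat) (h : k < es.length) :
    pvJ es (k+1) = pvJ es k + (if k = 0 then 0 else 3) + PySem.Str.len (es.getD k "") := by
  unfold pvJ
  rw [List.take_add_one, List.getElem?_eq_getElem h]
  rw [show (some es[k]).toList = [es[k]] from rfl]
  rw [pvL_append_singleton]
  have : (es.take k = []) ↔ (k = 0) := by
    constructor
    · intro hh
      rcases Nat.eq_zero_or_pos k with h0 | h0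
      · exact h0
      · exfalso
        have := List.length_take (l := es) (i := k)
        rw [hh] at this
        simp at this
        omega
    · intro hh; simp [hh]
  rw [List.getD_eq_getElem es "" h]
  simp only [this]

lemma pvJ_mono (es : List String) {j k : Nat} (h : j ≤ k) : pvJ es j ≤ pvJ es k := by
  induction k with
  | zero => simp_all
  | succ k ih =>
    rcases Nat.lt_or_ge k es.length with hk | hk
    · rcases Nat.eq_or_lt_of_le h with rfl | hlt
      · exact le_refl _
      · have step := pvJ_succ es k hk
        have h1 := pvStrLen_nonneg (es.getD k "")
        have h2 : (0:Int) ≤ if k = 0 then 0 else 3 := by split <;> omega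
        have := ih (Nat.lt_succ_iff.mp hlt)
        omega
    · have : pvJ es (k+1) = pvJ es k := by
        unfold pvJ
        rw [List.take_of_length_le hk, List.take_of_length_le (by omega)]
      rcases Nat.eq_or_lt_of_le h with rfl | hlt
      · exact le_refl _
      · rw [this]; exact ih (Nat.lt_succ_iff.mp hlt)

lemma pvBest_le (es : List String) (ml : Int) : ∀ k, pvBest es ml k ≤ k
  | 0 => le_refl 0
  | k+1 => by
      unfold pvBest
      split
      · exact le_refl _
      · exact Nat.le_succ_of_le (pvBest_le es ml k)

lemma pvBest_sat (es : List String) {ml : Int} (hml : 0 ≤ ml) :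
    ∀ k, pvJ es (pvBest es ml k) ≤ ml
  | 0 => by simpa [pvBest, pvJ, pvL] using hml
  | k+1 => by
      unfold pvBest
      split
      · assumption
      · exact pvBest_sat es hml k

lemma pvBest_ge (es : List String) (ml : Int) {j : Nat} :
    ∀ {k}, j ≤ k → pvJ es j ≤ ml → j ≤ pvBest es ml k := by
  intro k
  induction k with
  | zero => intro h _; omega
  | succ k ih =>
    intro hjk hj
    unfold pvBest
    split
    · exact hjk
    · rcases Nat.eq_or_lt_of_le hjk with rfl | hlt
      · omega
      · exact ih (Nat.lt_succ_iff.mp hlt) hj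

lemma pvBest_of_sat (es : List String) {ml : Int} {k : Nat} (h : pvJ es k ≤ ml) :
    pvBest es ml k = k := by
  cases k with
  | zero => rfl
  | succ k => simp [pvBest, h]

lemma pvLoopA_eq (es : List String) {ml : Int} (hml : 0 ≤ ml) :
    ∀ k f, k < f →
      pvLoopA es ml f (k : Int) (PySem.Str.join " | " (es.take k)) = ((pvBest es ml k : Nat) : Int) := by
  intro k
  induction k with
  | zero =>
    intro f hf
    obtain ⟨f', rfl⟩ : ∃ f', f = f' + 1 := ⟨f - 1, by omega⟩
    have h0 : PySem.Str.len (PySem.Str.join " | " (es.take 0)) = 0 := by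
      rw [pvL_join]; simp [pvL]
    simp [pvLoopA, pvBest, not_lt.mpr hml]
  | succ k ih =>
    intro f hf
    obtain ⟨f', rfl⟩ : ∃ f', f = f' + 1 := ⟨f - 1, by omega⟩
    rw [pvLoopA, pvL_join]
    have hcast : ((k:Int) + 1) - 1 = ((k : Nat) : Int) := by ring
    split
    · rename_i hgt
      push_cast
      rw [hcast, PySem.List.slice_to_natCast]
      rw [ih f' (by omega)]
      have hneg : ¬ pvJ es (k+1) ≤ ml := by unfold pvJ; omega
      simp [pvBest, hneg]
    · rename_i hle
      have : pvBest es ml (k+1) = k+1 := by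
        apply pvBest_of_sat
        unfold pvJ
        omega
      rw [this]

lemma pvLoopB_eq (es : List String) {ml : Int} (hml : 0 ≤ ml) :
    ∀ m k, es.length - k = m → k ≤ es.length → pvJ es k ≤ ml →
      pvLoopB ml (es.drop k) (pvJ es k) k = pvBest es ml es.length := by
  intro m
  induction m with
  | zero =>
    intro k hm hk hJ
    have hke : k = es.length := by omega
    subst hke
    rw [List.drop_of_length_le (le_refl _)]
    rw [pvLoopB]
    rw [pvBest_of_sat es hJ]
  | succ m ih =>
    intro k hm hk hJ
    have hklt : k < es.length := by omega
    rw [List.drop_eq_getElem_cons hklt]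
    rw [pvLoopB]
    have hstep := pvJ_succ es k hklt
    rw [List.getD_eq_getElem es "" hklt] at hstep
    have hadd : pvJ es k + (PySem.Str.len es[k] + if k = 0 then 0 else 3) = pvJ es (k+1) := by
      omega
    simp only [hadd]
    split_ifs with hgt
    · have h1 : k ≤ pvBest es ml es.length := pvBest_ge es ml (by omega) hJ
      have h2 : pvBest es ml es.length ≤ k := by
        by_contra hcon
        push Not at hcon
        have h3 : pvJ es (k+1) ≤ pvJ es (pvBest es ml es.length) := pvJ_mono es (by omega)
        have h4 := pvBest_sat es hml es.length
        omega
      omega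
    · push Not at hgt
      exact ih (k+1) (by omega) (by omega) (by omega)

-- ===== VERDICT (by name: the statement is the Claim_ definition above) =====
theorem splitOptionLine_spec : Claim_equal_splitOptionLine := by
  intro es ml _ hml
  have hA : pvLoopA es ml (es.length + 1) (es.length : Int) (PySem.Str.join " | " es)
      = ((pvBest es ml es.length : Nat) : Int) := by
    rw [show PySem.Str.join " | " es = PySem.Str.join " | " (es.take es.length) by
      rw [List.take_length]]
    exact pvLoopA_eq es hml es.length (es.length + 1) (by omega)
  have hB : pvLoopB ml es 0 0 = pvBest es ml es.length := by
    have h0 : pvJ es 0 = 0 := rfl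
    have := pvLoopB_eq es hml (es.length - 0) 0 rfl (by omega) (by rw [h0]; exact hml)
    simpa [h0] using this
  unfold Spec_splitOptionLine splitOptionLine splitOptionLine_alt
  simp only [hA, hB]
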